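-- pv_equiv track=rewrite | github.com/alexwday/aegis | src/aegis/etls/bank_earnings_report/retrieval/supplementary.py | get_previous_quarters
-- ===== SOURCE A (Python) =====
-- from typing import Any, Dict, List, Optional
--
-- def get_previous_quarters(fiscal_year: int, quarter: str, num_quarters: int = 8) -> List[tuple]:
--     """
--     Calculate the previous N quarters from a given quarter.
--
--     Args:
--         fiscal_year: Starting fiscal year (e.g., 2024)
--         quarter: Starting quarter (e.g., 'Q3')
--         num_quarters: Number of quarters to retrieve (default 8)
--
--     Returns:
--         List of (year, quarter) tuples in chronological order (oldest first)
--     """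
--     quarters = ["Q1", "Q2", "Q3", "Q4"]
--     q_idx = quarters.index(quarter)
--
--     result = []
--     current_year = fiscal_year
--     current_q_idx = q_idx
--
--     # Include the current quarter and go back num_quarters-1 more
--     for _ in range(num_quarters):
--         result.append((current_year, quarters[current_q_idx]))
--         current_q_idx -= 1
--         if current_q_idx < 0:
--             current_q_idx = 3
--             current_year -= 1
--
--     # Reverse to get chronological order (oldest first)
--     return list(reversed(result))
-- ===== SOURCE B (Python) =====
-- def get_previous_quarters(fiscal_year: int, quarter: str, num_quarters: int = 8):
--     """Same result as A, built forward from an absolute quarter index."""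
--     quarters = ["Q1", "Q2", "Q3", "Q4"]
--     start = fiscal_year * 4 + quarters.index(quarter)
--     result = []
--     for idx in range(start - num_quarters + 1, start + 1):
--         year, q = divmod(idx, 4)
--         result.append((year, quarters[q]))
--     return result
-- ===== Notes on version B (the rewrite author's own statement) =====
-- stated objective: idiomatic
-- what changed: Replaces the backward decrement loop with wrap-around conditional plus final reversal by a single forward pass over absolute quarter indices (fiscal_year*4+q_idx), decoding each index with divmod, so the list is built directly in chronological order.
import Mathlib
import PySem

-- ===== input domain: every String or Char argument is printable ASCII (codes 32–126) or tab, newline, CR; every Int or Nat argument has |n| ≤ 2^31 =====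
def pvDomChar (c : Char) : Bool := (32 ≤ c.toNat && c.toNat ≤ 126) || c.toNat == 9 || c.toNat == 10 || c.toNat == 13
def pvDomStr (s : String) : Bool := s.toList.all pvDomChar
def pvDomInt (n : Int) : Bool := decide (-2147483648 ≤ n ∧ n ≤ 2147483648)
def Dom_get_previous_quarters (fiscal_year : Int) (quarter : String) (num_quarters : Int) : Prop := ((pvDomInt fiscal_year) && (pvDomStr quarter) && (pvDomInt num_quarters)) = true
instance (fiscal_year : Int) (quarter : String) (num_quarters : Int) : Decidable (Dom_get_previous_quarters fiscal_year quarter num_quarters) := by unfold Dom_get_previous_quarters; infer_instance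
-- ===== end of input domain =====

-- B builds the same list forward from absolute quarter indices with divmod;
-- equivalence on the return value, for quarter one of "Q1".."Q4" (else both raise ValueError).

-- ===== PORT A =====
def pvQuartersList : List String := ["Q1", "Q2", "Q3", "Q4"]

-- the 'for _ in range(num_quarters)' loop of A, state (year, q_idx, result)
def pvLoopA : Nat → Int → Int → List (Int × String) → List (Int × String)
  | 0, _, _, acc => acc
  | k + 1, year, qidx, acc =>
    let acc' := acc ++ [(year, (PySem.List.pyGet? pvQuartersList qidx).getD "")]
    let q' := qidx - 1
    if q' < 0 then pvLoopA k (year - 1) 3 acc'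
    else pvLoopA k year q' acc'

def get_previous_quarters (fiscal_year : Int) (quarter : String) (num_quarters : Int) : List (Int × String) :=
  match PySem.List.index? pvQuartersList quarter with
  | none => []   -- Python raises ValueError here; excluded by Pre_
  | some m => (pvLoopA num_quarters.toNat fiscal_year (m : Int) []).reverse

-- ===== PORT B =====
def get_previous_quarters_alt (fiscal_year : Int) (quarter : String) (num_quarters : Int) : List (Int × String) :=
  match PySem.List.index? pvQuartersList quarter with
  | none => []   -- Python raises ValueError here; excluded by Pre_
  | some m =>
    let start : Int := fiscal_year * 4 + (m : Int)
    (PySem.List.pyRange (start - num_quarters + 1) (start + 1) 1).map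
      (fun idx =>
        (PySem.Int.floordiv idx 4,
         (PySem.List.pyGet? pvQuartersList (PySem.Int.mod idx 4)).getD ""))

-- ===== PRECONDITION & SPEC =====
-- Pre_ excludes exactly the quarter strings not in ["Q1","Q2","Q3","Q4"], on which
-- both A and B raise ValueError (list.index).
def Pre_get_previous_quarters (fiscal_year : Int) (quarter : String) (num_quarters : Int) : Prop :=
  quarter = "Q1" ∨ quarter = "Q2" ∨ quarter = "Q3" ∨ quarter = "Q4"
instance (fiscal_year : Int) (quarter : String) (num_quarters : Int) : Decidable (Pre_get_previous_quarters fiscal_year quarter num_quarters) := by unfold Pre_get_previous_quarters; infer_instance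

def pvWitness_get_previous_quarters : Int × String × Int := (2024, "Q3", 8)

def Spec_get_previous_quarters (fiscal_year : Int) (quarter : String) (num_quarters : Int) (out : List (Int × String)) : Prop := out = get_previous_quarters_alt fiscal_year quarter num_quarters
instance (fiscal_year : Int) (quarter : String) (num_quarters : Int) (out : List (Int × String)) : Decidable (Spec_get_previous_quarters fiscal_year quarter num_quarters out) := by unfold Spec_get_previous_quarters; infer_instance

-- ===== CLAIM (what is proved, stated in full; the proofs are below) =====
def Claim_equal_get_previous_quarters : Prop := ∀ (fiscal_year : Int) (quarter : String) (num_quarters : Int), Dom_get_previous_quarters fiscal_year quarter num_quarters → Pre_get_previous_quarters fiscal_year quarter num_quarters → Spec_get_previous_quarters fiscal_year quarter num_quarters (get_previous_quarters fiscal_year quarter num_quarters)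

-- ===== LEMMAS AND PROOFS =====

-- the (year, quarter) pair decoded from an absolute quarter index (B's loop body)
def pvDecode (idx : Int) : Int × String :=
  (PySem.Int.floordiv idx 4,
   (PySem.List.pyGet? pvQuartersList (PySem.Int.mod idx 4)).getD "")

lemma pvDecode_eval (y q : Int) (h0 : 0 ≤ q) (h4 : q < 4) :
    pvDecode (y * 4 + q) = (y, (PySem.List.pyGet? pvQuartersList q).getD "") := by
  unfold pvDecode
  rw [PySem.Int.floordiv_eq_ediv_of_pos (by norm_num),
      PySem.Int.mod_eq_emod_of_pos (by norm_num)]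
  have h1 : (y * 4 + q) / 4 = y := by omega
  have h2 : (y * 4 + q) % 4 = q := by omega
  rw [h1, h2]

lemma pvLoopA_eq (k : Nat) : ∀ (year qidx : Int), 0 ≤ qidx → qidx < 4 →
    ∀ acc, pvLoopA k year qidx acc
      = acc ++ (PySem.List.pyRange (year * 4 + qidx) (year * 4 + qidx - k) (-1)).map pvDecode := by
  induction k with
  | zero =>
    intro year qidx _ _ acc
    simp [pvLoopA, PySem.List.pyRange_neg_one_eq_nil]
  | succ k ih =>
    intro year qidx h0 h4 acc
    rw [PySem.List.pyRange_neg_one_cons (by push_cast; omega), List.map_cons]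
    simp only [pvLoopA]
    by_cases hq : qidx - 1 < 0
    · have hq0 : qidx = 0 := by omega
      subst hq0
      rw [if_pos hq, ih (year - 1) 3 (by omega) (by omega)]
      have hd : pvDecode (year * 4 + 0) = (year, (PySem.List.pyGet? pvQuartersList 0).getD "") := by
        simpa using pvDecode_eval year 0 (by omega) (by omega)
      rw [hd, show (year - 1) * 4 + 3 = year * 4 + 0 - 1 by ring,
          show year * 4 + 0 - 1 - (k : Int) = year * 4 + 0 - ((k + 1 : Nat) : Int) by push_cast; ring]
      simp
    · rw [if_neg hq, ih year (qidx - 1) (by omega) (by omega)]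
      have hd : pvDecode (year * 4 + qidx) = (year, (PySem.List.pyGet? pvQuartersList qidx).getD "") := by
        simpa using pvDecode_eval year qidx h0 h4
      rw [hd, show year * 4 + (qidx - 1) = year * 4 + qidx - 1 by ring,
          show year * 4 + qidx - 1 - (k : Int) = year * 4 + qidx - ((k + 1 : Nat) : Int) by push_cast; ring]
      simp

lemma pv_main (fy : Int) (n : Int) (m : Nat) (hm : m < 4) :
    (pvLoopA n.toNat fy (m : Int) []).reverse
      = (PySem.List.pyRange (fy * 4 + (m : Int) - n + 1) (fy * 4 + (m : Int) + 1) 1).map pvDecode := by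
  set start : Int := fy * 4 + (m : Int) with hstart
  rw [pvLoopA_eq n.toNat fy (m : Int) (by positivity) (by exact_mod_cast hm) [],
      List.nil_append, PySem.List.pyRange_neg_one_eq_reverse, List.map_reverse,
      List.reverse_reverse]
  congr 1
  rcases (by omega : 0 ≤ n ∨ n < 0) with hn | hn
  · have : ((n.toNat : Int)) = n := by omega
    rw [this]
  · rw [PySem.List.pyRange_one_eq_nil (by omega), PySem.List.pyRange_one_eq_nil (by omega)]

-- ===== VERDICT (by name: the statement is the Claim_ definition above) =====
theorem get_previous_quarters_spec : Claim_equal_get_previous_quarters := by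
  intro fy q n _ hpre
  unfold Spec_get_previous_quarters get_previous_quarters get_previous_quarters_alt
  rcases hpre with h | h | h | h <;> subst h <;>
    simp only [show PySem.List.index? pvQuartersList "Q1" = some 0 by decide,
               show PySem.List.index? pvQuartersList "Q2" = some 1 by decide,
               show PySem.List.index? pvQuartersList "Q3" = some 2 by decide,
               show PySem.List.index? pvQuartersList "Q4" = some 3 by decide]
  · exact pv_main fy n 0 (by omega)
  · exact pv_main fy n 1 (by omega)
  · exact pv_main fy n 2 (by omega)
  · exact pv_main fy n 3 (by omega)
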